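-- pv_equiv track=rewrite | github.com/logan-robbins/spymaster | backend/scripts/analyze_vp_signals.py | _match_events
-- ===== SOURCE A (Python) =====
-- from typing import Any, Dict, List, Sequence, Tuple
--
-- def _match_events(
--     predicted: Sequence[int],
--     reference: Sequence[int],
--     tolerance: int,
-- ) -> List[Tuple[int, int]]:
--     """Greedy one-to-one matching under absolute index tolerance."""
--     matches: List[Tuple[int, int]] = []
--     used_pred: set[int] = set()
--
--     for ref_idx, ref in enumerate(reference):
--         best_pred_idx = -1
--         best_abs_diff = tolerance + 1
--         for j, pred in enumerate(predicted):
--             if j in used_pred: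
--                 continue
--             diff = abs(pred - ref)
--             if diff <= tolerance and diff < best_abs_diff:
--                 best_abs_diff = diff
--                 best_pred_idx = j
--         if best_pred_idx >= 0:
--             used_pred.add(best_pred_idx)
--             matches.append((ref_idx, best_pred_idx))
--     return matches
-- ===== SOURCE B (Python) =====
-- from typing import List, Sequence, Tuple
--
--
-- def _lower(arr, x):
--     """First position p with arr[p][0] >= x (arr sorted by value)."""
--     lo, hi = 0, len(arr)
--     while lo < hi:
--         mid = (lo + hi) // 2
--         if arr[mid][0] < x:
--             lo = mid + 1
--         else:
--             hi = mid
--     return lo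
--
--
-- def _match_events(
--     predicted: Sequence[int],
--     reference: Sequence[int],
--     tolerance: int,
-- ) -> List[Tuple[int, int]]:
--     """Greedy one-to-one matching under absolute index tolerance.
--
--     Keeps the unused predictions as a list of (value, original index) pairs
--     sorted lexicographically; per reference, binary search locates the nearest
--     values on either side (with the smallest original index of a duplicated
--     value at the start of its run), so no per-reference scan of all
--     predictions is needed.
--     """
--     arr = sorted((v, j) for j, v in enumerate(predicted))
--     matches: List[Tuple[int, int]] = []
--     for ref_idx, ref in enumerate(reference):
--         pos = _lower(arr, ref)
--         best = None  # (diff, original index, position in arr)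
--         if pos < len(arr):
--             vr, jr = arr[pos]
--             if vr - ref <= tolerance:
--                 best = (vr - ref, jr, pos)
--         if pos > 0:
--             vl = arr[pos - 1][0]
--             if ref - vl <= tolerance:
--                 pl = _lower(arr, vl)
--                 jl = arr[pl][1]
--                 if best is None or (ref - vl, jl) < (best[0], best[1]):
--                     best = (ref - vl, jl, pl)
--         if best is not None:
--             matches.append((ref_idx, best[1]))
--             arr.pop(best[2])
--     return matches
-- ===== Notes on version B (the rewrite author's own statement) =====
-- stated objective: faster
-- what changed: Replaces A's per-reference linear scan of all predictions (tracking best index/diff and skipping a used-set) by a list of (value, index) pairs sorted once up front: each reference is located by binary search, only the two nearest neighbouring value runs are inspected (run start gives the smallest original index), and the chosen pair is deleted from the sorted list.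
import Mathlib
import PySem

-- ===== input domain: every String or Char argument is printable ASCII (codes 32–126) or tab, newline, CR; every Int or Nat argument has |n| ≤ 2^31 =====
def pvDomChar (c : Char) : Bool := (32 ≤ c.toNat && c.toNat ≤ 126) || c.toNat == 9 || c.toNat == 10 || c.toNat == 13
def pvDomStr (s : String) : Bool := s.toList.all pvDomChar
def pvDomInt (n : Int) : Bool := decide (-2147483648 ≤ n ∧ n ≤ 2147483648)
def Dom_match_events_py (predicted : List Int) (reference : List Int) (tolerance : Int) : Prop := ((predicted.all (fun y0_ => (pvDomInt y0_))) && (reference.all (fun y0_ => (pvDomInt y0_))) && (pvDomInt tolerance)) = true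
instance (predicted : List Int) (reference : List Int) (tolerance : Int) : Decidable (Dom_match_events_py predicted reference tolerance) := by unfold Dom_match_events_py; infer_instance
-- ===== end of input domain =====

-- B replaces A's per-reference scan over all predictions by a sorted list of
-- (value, index) pairs with binary search for the nearest unused neighbours
-- and deletion of the chosen pair (objective: alternative algorithm).


-- ===== PORT A =====
-- literal port of A: outer loop over enumerate(reference); inner loop over
-- enumerate(predicted) skipping used indices, tracking (best_pred_idx, best_abs_diff).
def match_events_py (predicted : List Int) (reference : List Int) (tolerance : Int) : List (Int × Int) :=
  (List.foldl
    (fun (st : List (Int × Int) × PySem.Set Int) (rp : Int × Int) =>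
      let best := List.foldl
        (fun (b : Int × Int) (jp : Int × Int) =>
          if PySem.Set.contains st.2 jp.1 then b
          else
            let diff := |jp.2 - rp.2|
            if diff ≤ tolerance ∧ diff < b.2 then (jp.1, diff) else b)
        (-1, tolerance + 1) (PySem.List.enumerate predicted 0)
      if best.1 ≥ 0 then (st.1 ++ [(rp.1, best.1)], PySem.Set.add st.2 best.1) else st)
    ([], PySem.Set.empty) (PySem.List.enumerate reference 0)).1

-- ===== PORT B =====
-- port of Source B's helper _lower: binary search for the first position p in
-- [lo, hi) with arr[p][0] >= x (list indexing arr[mid][0] as getD; always in range).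
def pvLower (arr : List (Int × Int)) (x : Int) (lo hi : Nat) : Nat :=
  if _h : lo < hi then
    if (arr.getD ((lo + hi) / 2) (0, 0)).1 < x then pvLower arr x ((lo + hi) / 2 + 1) hi
    else pvLower arr x lo ((lo + hi) / 2)
  else lo
termination_by hi - lo
decreasing_by all_goals omega

-- Source B's loop body: locate ref's insertion point, build best from the right
-- neighbour run and the left neighbour run, compare lexicographically.
-- Source B's 'if best is None or (ref - vl, jl) < (best[0], best[1])' update, as a helper
def pvMerge (d jl : Int) (pl : Nat) (best0 : Option (Int × Int × Nat)) : Option (Int × Int × Nat) :=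
  match best0 with
  | none => some (d, jl, pl)
  | some b => if d < b.1 ∨ (d = b.1 ∧ jl < b.2.1) then some (d, jl, pl) else some b

def pvPick (tolerance : Int) (arr : List (Int × Int)) (ref : Int) : Option (Int × Int × Nat) :=
  let pos := pvLower arr ref 0 arr.length
  let best0 : Option (Int × Int × Nat) :=
    if pos < arr.length then
      let vr := (arr.getD pos (0, 0)).1
      let jr := (arr.getD pos (0, 0)).2
      if vr - ref ≤ tolerance then some (vr - ref, jr, pos) else none
    else none
  if 0 < pos then
    let vl := (arr.getD (pos - 1) (0, 0)).1
    if ref - vl ≤ tolerance then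
      let pl := pvLower arr vl 0 arr.length
      let jl := (arr.getD pl (0, 0)).2
      pvMerge (ref - vl) jl pl best0
    else best0
  else best0

def pvStepB (tolerance : Int) (st : List (Int × Int) × List (Int × Int)) (rp : Int × Int) :
    List (Int × Int) × List (Int × Int) :=
  match pvPick tolerance st.2 rp.2 with
  | none => st
  | some b => (st.1 ++ [(rp.1, b.2.1)], st.2.eraseIdx b.2.2)

-- literal port of B: arr = sorted((v, j) for j, v in enumerate(predicted))
-- (Python tuple order = lexicographic), then the fold of pvStepB over enumerate(reference).
def match_events_py_alt (predicted : List Int) (reference : List Int) (tolerance : Int) : List (Int × Int) :=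
  (List.foldl (pvStepB tolerance)
    ([], PySem.List.sorted2 ((PySem.List.enumerate predicted 0).map (fun jv => (jv.2, jv.1)))
          (fun p => p.1) (fun p => p.2) false)
    (PySem.List.enumerate reference 0)).1

-- ===== PRECONDITION & SPEC =====
def Spec_match_events_py (predicted : List Int) (reference : List Int) (tolerance : Int) (out : List (Int × Int)) : Prop := out = match_events_py_alt predicted reference tolerance
instance (predicted : List Int) (reference : List Int) (tolerance : Int) (out : List (Int × Int)) : Decidable (Spec_match_events_py predicted reference tolerance out) := by unfold Spec_match_events_py; infer_instance

-- ===== CLAIM (what is proved, stated in full; the proofs are below) =====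
def Claim_equal_match_events_py : Prop := ∀ (predicted : List Int) (reference : List Int) (tolerance : Int), Dom_match_events_py predicted reference tolerance → Spec_match_events_py predicted reference tolerance (match_events_py predicted reference tolerance)

-- ===== LEMMAS AND PROOFS =====

-- strict lexicographic order on (value, index) pairs
def pvLex (a b : Int × Int) : Prop := a.1 < b.1 ∨ (a.1 = b.1 ∧ a.2 < b.2)

-- A's inner best-tracking step (after the used-skip has been removed)
def pvBestStep (tol ref : Int) (b : Int × Int) (jp : Int × Int) : Int × Int :=
  if |jp.2 - ref| ≤ tol ∧ |jp.2 - ref| < b.2 then (jp.1, |jp.2 - ref|) else b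

-- "m is the greedy choice for ref among the available (index, value) pairs"
def pvIsBest (tol ref : Int) (avail : List (Int × Int)) (m : Int × Int) : Prop :=
  m ∈ avail ∧ |m.2 - ref| ≤ tol ∧
    ∀ y ∈ avail, |y.2 - ref| ≤ tol →
      (|m.2 - ref| < |y.2 - ref| ∨ (|m.2 - ref| = |y.2 - ref| ∧ m.1 ≤ y.1))

theorem pvSkip_filter (tol ref : Int) (used : PySem.Set Int) :
    ∀ (L : List (Int × Int)) (b : Int × Int),
      L.foldl (fun b jp => if PySem.Set.contains used jp.1 then b else pvBestStep tol ref b jp) b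
      = (L.filter (fun jp => !(PySem.Set.contains used jp.1))).foldl (pvBestStep tol ref) b := by
  intro L
  induction L with
  | nil => intro b; rfl
  | cons h t ih =>
    intro b
    simp only [List.foldl_cons, List.filter_cons]
    by_cases hc : PySem.Set.contains used h.1 = true
    · rw [if_pos hc, if_neg (by simp_all)]
      exact ih b
    · rw [if_neg hc, if_pos (by simp_all), List.foldl_cons]
      exact ih _

-- characterisation of A's inner scan: it returns the lexicographic argmin of
-- (distance, index) over the in-tolerance available pairs, or (-1, tol+1) when none
theorem pvScanA (tol ref : Int) :
    ∀ (avail : List (Int × Int)), avail.Pairwise (fun p q => p.1 < q.1) →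
      ((∀ y ∈ avail, ¬ (|y.2 - ref| ≤ tol)) ∧
        avail.foldl (pvBestStep tol ref) (-1, tol + 1) = (-1, tol + 1)) ∨
      (∃ m, pvIsBest tol ref avail m ∧
        avail.foldl (pvBestStep tol ref) (-1, tol + 1) = (m.1, |m.2 - ref|)) := by
  intro avail
  induction avail using List.reverseRecOn with
  | nil => intro _; exact Or.inl ⟨by simp, rfl⟩
  | append_singleton xs x ih =>
    intro hp
    have hxs : xs.Pairwise (fun p q => p.1 < q.1) := hp.sublist (List.sublist_append_left _ _)
    have hlt : ∀ y ∈ xs, y.1 < x.1 := by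
      have := List.pairwise_append.1 hp
      intro y hy; exact this.2.2 y hy x (by simp)
    rw [List.foldl_append]
    rcases ih hxs with ⟨hno, hres⟩ | ⟨m, hb, hres⟩
    · rw [hres]
      by_cases hc : |x.2 - ref| ≤ tol
      · refine Or.inr ⟨x, ⟨by simp, hc, ?_⟩, ?_⟩
        · intro y hy hyc
          rcases List.mem_append.1 hy with h | h
          · exact absurd hyc (hno y h)
          · simp at h; subst h; exact Or.inr ⟨rfl, le_refl _⟩
        · simp only [List.foldl_cons, List.foldl_nil, pvBestStep]
          rw [if_pos ⟨hc, by omega⟩]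
      · refine Or.inl ⟨?_, ?_⟩
        · intro y hy
          rcases List.mem_append.1 hy with h | h
          · exact hno y h
          · simp at h; subst h; exact hc
        · simp [pvBestStep, hc]
    · rw [hres]
      by_cases hc : |x.2 - ref| ≤ tol ∧ |x.2 - ref| < |m.2 - ref|
      · refine Or.inr ⟨x, ⟨by simp, hc.1, ?_⟩, by simp [pvBestStep, hc]⟩
        intro y hy hyc
        rcases List.mem_append.1 hy with h | h
        · rcases hb.2.2 y h hyc with h' | h' <;> [left; left] <;> omega
        · simp at h; subst h; exact Or.inr ⟨rfl, le_refl _⟩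
      · refine Or.inr ⟨m, ⟨List.mem_append.2 (Or.inl hb.1), hb.2.1, ?_⟩, by simp [pvBestStep, hc]⟩
        intro y hy hyc
        rcases List.mem_append.1 hy with h | h
        · exact hb.2.2 y h hyc
        · simp at h; subst h
          have := hlt m hb.1
          rcases Decidable.em (|y.2 - ref| < |m.2 - ref|) with h' | h'
          · exact absurd ⟨hyc, h'⟩ hc
          · rcases lt_or_eq_of_le (not_lt.1 h') with h'' | h''
            · exact Or.inl h''
            · exact Or.inr ⟨h'', le_of_lt this⟩


theorem pvMem_eq_of_fst (avail : List (Int × Int))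
    (hp : avail.Pairwise (fun p q => p.1 < q.1)) {m m' : Int × Int}
    (h1 : m ∈ avail) (h2 : m' ∈ avail) (h : m.1 = m'.1) : m = m' := by
  rcases List.mem_iff_getElem.1 h1 with ⟨i, hi, rfl⟩
  rcases List.mem_iff_getElem.1 h2 with ⟨k, hk, rfl⟩
  have hpg := List.pairwise_iff_getElem.1 hp
  rcases lt_trichotomy i k with hik | hik | hik
  · exact absurd h (by have := hpg i k hi hk hik; omega)
  · subst hik; rfl
  · exact absurd h (by have := hpg k i hk hi hik; omega)

theorem pvBest_unique (tol ref : Int) (avail : List (Int × Int))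
    (hp : avail.Pairwise (fun p q => p.1 < q.1)) {m m' : Int × Int}
    (h1 : pvIsBest tol ref avail m) (h2 : pvIsBest tol ref avail m') : m = m' := by
  have a1 := h1.2.2 m' h2.1 h2.2.1
  have a2 := h2.2.2 m h1.1 h1.2.1
  exact pvMem_eq_of_fst avail hp h1.1 h2.1 (by omega)


-- binary-search correctness for Source B's _lower on a value-sorted list
theorem pvLower_spec (arr : List (Int × Int)) (x : Int)
    (mono : ∀ i j : Nat, i ≤ j → j < arr.length →
      (arr.getD i (0, 0)).1 ≤ (arr.getD j (0, 0)).1) :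
    ∀ lo hi : Nat, lo ≤ hi → hi ≤ arr.length →
      (∀ k < lo, (arr.getD k (0, 0)).1 < x) →
      (∀ k, hi ≤ k → k < arr.length → x ≤ (arr.getD k (0, 0)).1) →
      lo ≤ pvLower arr x lo hi ∧ pvLower arr x lo hi ≤ hi ∧
      (∀ k < pvLower arr x lo hi, (arr.getD k (0, 0)).1 < x) ∧
      (∀ k, pvLower arr x lo hi ≤ k → k < arr.length → x ≤ (arr.getD k (0, 0)).1) := by
  intro lo hi
  induction lo, hi using pvLower.induct arr x with
  | case1 lo hi h hmid ih =>
    intro _ hhi hl hr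
    rw [pvLower, dif_pos h, if_pos hmid]
    have := ih (by omega) hhi
      (fun k hk => lt_of_le_of_lt (mono k ((lo + hi)/2) (by omega) (by omega)) hmid) hr
    exact ⟨by omega, by omega, this.2.2.1, this.2.2.2⟩
  | case2 lo hi h hmid ih =>
    intro hlo hhi hl hr
    rw [pvLower, dif_pos h, if_neg hmid]
    have := ih (by omega) (by omega) hl
      (fun k hk hk2 => le_trans (not_lt.1 hmid) (mono ((lo + hi)/2) k hk hk2))
    exact ⟨this.1, by omega, this.2.2.1, this.2.2.2⟩
  | case3 lo hi h =>
    intro hlo _ hl hr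
    rw [pvLower, dif_neg h]
    exact ⟨le_refl _, by omega, hl, fun k hk hk2 => hr k (by omega) hk2⟩


-- correctness of Source B's neighbour-based choice on a lexicographically sorted list
theorem pvChoose (tol ref : Int) (arr : List (Int × Int)) (hlex : arr.Pairwise pvLex) :
    (pvPick tol arr ref = none ∧ ∀ z ∈ arr, ¬ (|z.1 - ref| ≤ tol)) ∨
    (∃ v j p, pvPick tol arr ref = some (|v - ref|, j, p) ∧ p < arr.length ∧
      arr.getD p (0, 0) = (v, j) ∧ |v - ref| ≤ tol ∧
      ∀ z ∈ arr, |z.1 - ref| ≤ tol →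
        (|v - ref| < |z.1 - ref| ∨ (|v - ref| = |z.1 - ref| ∧ j ≤ z.2))) := by
  have hget : ∀ k (_ : k < arr.length), arr.getD k (0, 0) = arr[k] := by
    intro k hk
    simp [List.getD_eq_getElem?_getD, List.getElem?_eq_getElem hk]
  have hpg := List.pairwise_iff_getElem.1 hlex
  have mono : ∀ i j : Nat, i ≤ j → j < arr.length →
      (arr.getD i (0, 0)).1 ≤ (arr.getD j (0, 0)).1 := by
    intro i j hij hj
    rcases Nat.lt_or_ge i j with h | h
    · rw [hget i (by omega), hget j hj]
      rcases hpg i j (by omega) hj h with h' | h' <;> omega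
    · have : i = j := by omega
      subst this; exact le_refl _
  -- position of ref
  have hpos := pvLower_spec arr ref mono 0 arr.length (by omega) (le_refl _)
    (by omega) (by omega)
  set pos := pvLower arr ref 0 arr.length with hposdef
  obtain ⟨-, hposle, hL, hR⟩ := hpos
  -- the generic per-element bounds
  have hboundR : ∀ (hpn : pos < arr.length) k (hk : k < arr.length), pos ≤ k →
      |arr[k].1 - ref| ≤ tol →
        ((arr.getD pos (0,0)).1 - ref ≤ tol ∧
         ((arr.getD pos (0,0)).1 - ref < |arr[k].1 - ref| ∨
          ((arr.getD pos (0,0)).1 - ref = |arr[k].1 - ref| ∧ (arr.getD pos (0,0)).2 ≤ arr[k].2))) := by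
    intro hpn k hk hkp hkc
    have h1 : ref ≤ arr[k].1 := by have := hR k hkp hk; rw [hget k hk] at this; exact this
    have h2 : (arr.getD pos (0,0)).1 ≤ arr[k].1 := by
      have := mono pos k hkp hk; rw [hget k hk] at this; exact this
    have habs : |arr[k].1 - ref| = arr[k].1 - ref := abs_of_nonneg (by omega)
    refine ⟨by omega, ?_⟩
    rcases lt_or_eq_of_le h2 with h | h
    · left; omega
    · right
      refine ⟨by omega, ?_⟩
      rcases Nat.lt_or_ge pos k with hpk | hpk
      · have := hpg pos k hpn hk hpk
        rw [hget pos hpn] at *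
        rcases this with h' | h' <;> [omega; exact le_of_lt h'.2]
      · have : pos = k := by omega
        subst this; rw [hget pos hpn]
  have hboundL : ∀ (hp0 : 0 < pos) k (hk : k < arr.length), k < pos →
      |arr[k].1 - ref| ≤ tol →
        (ref - (arr.getD (pos-1) (0,0)).1 ≤ tol ∧
         (ref - (arr.getD (pos-1) (0,0)).1 < |arr[k].1 - ref| ∨
          (ref - (arr.getD (pos-1) (0,0)).1 = |arr[k].1 - ref| ∧
            (arr.getD (pvLower arr (arr.getD (pos-1) (0,0)).1 0 arr.length) (0,0)).2 ≤ arr[k].2))) := by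
    intro hp0 k hk hkp hkc
    have hp1 : pos - 1 < arr.length := by omega
    set vl := (arr.getD (pos-1) (0,0)).1 with hvl
    have hvlref : vl < ref := hL (pos-1) (by omega)
    have h1 : arr[k].1 < ref := by have := hL k hkp; rwa [hget k hk] at this
    have h2 : arr[k].1 ≤ vl := by
      have := mono k (pos-1) (by omega) hp1; rw [hget k hk] at this; exact this
    have habs : |arr[k].1 - ref| = ref - arr[k].1 := by rw [abs_of_nonpos (by omega)]; ring
    refine ⟨by omega, ?_⟩
    rcases lt_or_eq_of_le h2 with h | h
    · left; omega
    · right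
      refine ⟨by omega, ?_⟩
      -- k is in the vl-run; pl is its first position
      have hpl := pvLower_spec arr vl mono 0 arr.length (by omega) (le_refl _) (by omega) (by omega)
      set pl := pvLower arr vl 0 arr.length with hpldef
      obtain ⟨-, -, hLl, hRl⟩ := hpl
      have hkpl : pl ≤ k := by
        by_contra hc
        have := hLl k (by omega)
        rw [hget k hk] at this; omega
      have hplk : pl < arr.length := by omega
      rcases Nat.lt_or_ge pl k with hpk | hpk
      · have := hpg pl k hplk hk hpk
        have hplv : (arr.getD pl (0,0)).1 = vl := by
          have hx := hRl pl (le_refl _) hplk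
          have hy := mono pl (pos-1) (by omega) hp1
          omega
        rw [hget pl hplk] at *
        rcases this with h' | h' <;> [omega; exact le_of_lt h'.2]
      · have : pl = k := by omega
        subst this; rw [hget pl hplk]
  -- case split mirroring pvPick
  show _ ∨ _
  rw [pvPick]
  simp only [← hposdef]
  by_cases hp0 : 0 < pos
  · have hp1 : pos - 1 < arr.length := by omega
    set vl := (arr.getD (pos-1) (0,0)).1 with hvl
    have hvlref : vl < ref := hL (pos-1) (by omega)
    by_cases hcl : ref - vl ≤ tol
    · -- left candidate exists
      have hpl := pvLower_spec arr vl mono 0 arr.length (by omega) (le_refl _) (by omega) (by omega)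
      set pl := pvLower arr vl 0 arr.length with hpldef
      obtain ⟨-, -, hLl, hRl⟩ := hpl
      have hplle : pl ≤ pos - 1 := by
        by_contra hc
        have := hLl (pos-1) (by omega)
        omega
      have hplk : pl < arr.length := by omega
      have hplv : (arr.getD pl (0,0)).1 = vl := by
        have hx := hRl pl (le_refl _) hplk
        have hy := mono pl (pos-1) hplle hp1
        omega
      have habsl : |vl - ref| = ref - vl := by rw [abs_of_nonpos (by omega)]; ring
      by_cases hpn : pos < arr.length
      · set vr := (arr.getD pos (0,0)).1 with hvr
        have hrefvr : ref ≤ vr := hR pos (le_refl _) hpn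
        by_cases hcr : vr - ref ≤ tol
        · -- both sides
          rw [if_pos hpn, if_pos hcr, if_pos hp0, if_pos hcl]
          simp only [pvMerge]
          by_cases hcmp : ref - vl < vr - ref ∨ (ref - vl = vr - ref ∧ (arr.getD pl (0,0)).2 < (arr.getD pos (0,0)).2)
          · rw [if_pos hcmp]
            refine Or.inr ⟨vl, (arr.getD pl (0,0)).2, pl, by rw [habsl], hplk, ?_, by omega, ?_⟩
            · rw [← hplv]
            · intro z hz hzc
              rcases List.mem_iff_getElem.1 hz with ⟨k, hk, rfl⟩
              rw [habsl]
              rcases Nat.lt_or_ge k pos with hkp | hkp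
              · exact (hboundL hp0 k hk hkp hzc).2
              · have := (hboundR hpn k hk hkp hzc).2
                rcases this with h | h <;> rcases hcmp with h' | h'
                · left; omega
                · left; omega
                · left; omega
                · right; exact ⟨by omega, by omega⟩
          · rw [if_neg hcmp]
            have habsr : |vr - ref| = vr - ref := abs_of_nonneg (by omega)
            refine Or.inr ⟨vr, (arr.getD pos (0,0)).2, pos, by rw [habsr], hpn, ?_, by omega, ?_⟩
            · exact Prod.mk.eta.symm
            · intro z hz hzc
              rcases List.mem_iff_getElem.1 hz with ⟨k, hk, rfl⟩
              rw [habsr]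
              push Not at hcmp
              rcases Nat.lt_or_ge k pos with hkp | hkp
              · have := (hboundL hp0 k hk hkp hzc).2
                have h2 := hcmp.1
                rcases this with h | h
                · left; omega
                · rcases lt_or_eq_of_le h2 with h' | h'
                  · left; omega
                  · right
                    refine ⟨by omega, ?_⟩
                    have := hcmp.2 (by omega)
                    omega
              · exact (hboundR hpn k hk hkp hzc).2
        · -- only left
          rw [if_pos hpn, if_neg hcr, if_pos hp0, if_pos hcl]
          simp only [pvMerge]
          refine Or.inr ⟨vl, (arr.getD pl (0,0)).2, pl, by rw [habsl], hplk, ?_, by omega, ?_⟩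
          · rw [← hplv]
          · intro z hz hzc
            rcases List.mem_iff_getElem.1 hz with ⟨k, hk, rfl⟩
            rw [habsl]
            rcases Nat.lt_or_ge k pos with hkp | hkp
            · exact (hboundL hp0 k hk hkp hzc).2
            · exact absurd (hboundR hpn k hk hkp hzc).1 hcr
      · -- only left (no right at all)
        rw [if_neg hpn, if_pos hp0, if_pos hcl]
        simp only [pvMerge]
        refine Or.inr ⟨vl, (arr.getD pl (0,0)).2, pl, by rw [habsl], hplk, ?_, by omega, ?_⟩
        · rw [← hplv]
        · intro z hz hzc
          rcases List.mem_iff_getElem.1 hz with ⟨k, hk, rfl⟩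
          rw [habsl]
          rcases Nat.lt_or_ge k pos with hkp | hkp
          · exact (hboundL hp0 k hk hkp hzc).2
          · omega
    · -- left out of tolerance
      by_cases hpn : pos < arr.length
      · set vr := (arr.getD pos (0,0)).1 with hvr
        have hrefvr : ref ≤ vr := hR pos (le_refl _) hpn
        by_cases hcr : vr - ref ≤ tol
        · rw [if_pos hpn, if_pos hcr, if_pos hp0, if_neg hcl]
          have habsr : |vr - ref| = vr - ref := abs_of_nonneg (by omega)
          refine Or.inr ⟨vr, (arr.getD pos (0,0)).2, pos, by rw [habsr], hpn, ?_, by omega, ?_⟩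
          · exact Prod.mk.eta.symm
          · intro z hz hzc
            rcases List.mem_iff_getElem.1 hz with ⟨k, hk, rfl⟩
            rw [habsr]
            rcases Nat.lt_or_ge k pos with hkp | hkp
            · exact absurd (hboundL hp0 k hk hkp hzc).1 hcl
            · exact (hboundR hpn k hk hkp hzc).2
        · rw [if_pos hpn, if_neg hcr, if_pos hp0, if_neg hcl]
          refine Or.inl ⟨rfl, ?_⟩
          intro z hz hzc
          rcases List.mem_iff_getElem.1 hz with ⟨k, hk, rfl⟩
          rcases Nat.lt_or_ge k pos with hkp | hkp
          · exact absurd (hboundL hp0 k hk hkp hzc).1 hcl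
          · exact absurd (hboundR hpn k hk hkp hzc).1 hcr
      · rw [if_neg hpn, if_pos hp0, if_neg hcl]
        refine Or.inl ⟨rfl, ?_⟩
        intro z hz hzc
        rcases List.mem_iff_getElem.1 hz with ⟨k, hk, rfl⟩
        rcases Nat.lt_or_ge k pos with hkp | hkp
        · exact absurd (hboundL hp0 k hk hkp hzc).1 hcl
        · omega
  · -- pos = 0
    by_cases hpn : pos < arr.length
    · set vr := (arr.getD pos (0,0)).1 with hvr
      have hrefvr : ref ≤ vr := hR pos (le_refl _) hpn
      by_cases hcr : vr - ref ≤ tol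
      · rw [if_pos hpn, if_pos hcr, if_neg hp0]
        have habsr : |vr - ref| = vr - ref := abs_of_nonneg (by omega)
        refine Or.inr ⟨vr, (arr.getD pos (0,0)).2, pos, by rw [habsr], hpn, ?_, by omega, ?_⟩
        · exact Prod.mk.eta.symm
        · intro z hz hzc
          rcases List.mem_iff_getElem.1 hz with ⟨k, hk, rfl⟩
          rw [habsr]
          exact (hboundR hpn k hk (by omega) hzc).2
      · rw [if_pos hpn, if_neg hcr, if_neg hp0]
        refine Or.inl ⟨rfl, ?_⟩
        intro z hz hzc
        rcases List.mem_iff_getElem.1 hz with ⟨k, hk, rfl⟩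
        exact absurd (hboundR hpn k hk (by omega) hzc).1 hcr
    · rw [if_neg hpn, if_neg hp0]
      refine Or.inl ⟨rfl, ?_⟩
      intro z hz hzc
      rcases List.mem_iff_getElem.1 hz with ⟨k, hk, rfl⟩
      omega


-- removing the chosen pair keeps the sorted-availability invariant
theorem pvErase (arr avail : List (Int × Int)) (p : Nat) (v j : Int)
    (hlex : arr.Pairwise pvLex) (hperm : arr.Perm (avail.map Prod.swap))
    (hav : avail.Pairwise (fun p q => p.1 < q.1))
    (hp : p < arr.length) (helem : arr.getD p (0, 0) = (v, j)) :
    (arr.eraseIdx p).Pairwise pvLex ∧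
    (arr.eraseIdx p).Perm (((avail.filter (fun q => q.1 ≠ j)).map Prod.swap)) := by
  refine ⟨List.Pairwise.sublist (List.eraseIdx_sublist arr p) hlex, ?_⟩
  have hget : arr[p] = (v, j) := by
    rw [← helem]
    simp [List.getD_eq_getElem?_getD, List.getElem?_eq_getElem hp]
  -- second components of arr are pairwise distinct
  have hnodup : (arr.map Prod.snd).Nodup := by
    have h1 : (avail.map Prod.fst).Nodup := by
      have : (avail.map Prod.fst).Pairwise (· ≠ ·) :=
        List.pairwise_map.2 (hav.imp (fun h => by omega))
      simpa [List.Nodup] using this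
    have h2 : ((avail.map Prod.swap).map Prod.snd) = avail.map Prod.fst := by
      simp [Function.comp_def]
    exact ((hperm.map Prod.snd).symm.nodup (h2 ▸ h1))
  have hkj : ∀ k (hk : k < arr.length), k ≠ p → arr[k].2 ≠ j := by
    intro k hk hkp hc
    apply hkp
    have hk' : k < (arr.map Prod.snd).length := by simpa using hk
    have hp' : p < (arr.map Prod.snd).length := by simpa using hp
    have : (arr.map Prod.snd)[k]'hk' = (arr.map Prod.snd)[p]'hp' := by
      simp only [List.getElem_map]
      rw [hget, hc]
    exact (hnodup.getElem_inj_iff).1 this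
  -- eraseIdx p = filter (snd ≠ j)
  have hfe : arr.eraseIdx p = arr.filter (fun z => z.2 ≠ j) := by
    rw [List.eraseIdx_eq_take_drop_succ]
    conv_rhs => rw [← List.take_append_drop p arr, List.drop_eq_getElem_cons hp]
    rw [List.filter_append, List.filter_cons]
    have : ¬ (decide (arr[p].2 ≠ j) = true) := by simp [hget]
    rw [if_neg this]
    congr 1
    · rw [eq_comm, List.filter_eq_self]
      intro a ha
      rcases List.mem_take_iff_getElem.1 ha with ⟨k, hk, rfl⟩
      simp only [decide_eq_true_eq]
      exact hkj k (by omega) (by omega)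
    · rw [eq_comm, List.filter_eq_self]
      intro a ha
      rcases List.mem_drop_iff_getElem.1 ha with ⟨k, hk, rfl⟩
      simp only [decide_eq_true_eq]
      exact hkj (p + 1 + k) (by omega) (by omega)
  rw [hfe]
  have := hperm.filter (fun z => z.2 ≠ j)
  refine this.trans ?_
  rw [List.filter_map]
  have : ((fun z : Int × Int => decide (z.2 ≠ j)) ∘ Prod.swap) = (fun q : Int × Int => decide (q.1 ≠ j)) := by
    funext q; rfl
  rw [this]


-- the initial sorted array: sorted2 of the swapped enumeration
theorem pvSorted2_eq (xs : List (Int × Int)) :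
    PySem.List.sorted2 xs (fun p => p.1) (fun p => p.2) false
      = PySem.List.sorted xs (fun p => toLex p) false := by
  have hbef : (fun a b : Int × Int => decide (a.1 < b.1) || (!decide (b.1 < a.1) && decide (a.2 < b.2)))
      = (fun a b : Int × Int => decide (toLex a < toLex b)) := by
    funext a b
    by_cases h1 : a.1 < b.1 <;> by_cases h2 : b.1 < a.1 <;> by_cases h3 : a.2 < b.2 <;>
      simp [Prod.Lex.lt_iff, h1, h2, h3] <;> omega
  unfold PySem.List.sorted2 PySem.List.sorted
  simp only [Bool.false_eq_true, if_false]
  rw [hbef]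

theorem pvInit (predicted : List Int) :
    (PySem.List.sorted2 ((PySem.List.enumerate predicted 0).map (fun jv => (jv.2, jv.1)))
      (fun p => p.1) (fun p => p.2) false).Pairwise pvLex ∧
    (PySem.List.sorted2 ((PySem.List.enumerate predicted 0).map (fun jv => (jv.2, jv.1)))
      (fun p => p.1) (fun p => p.2) false).Perm
      ((PySem.List.enumerate predicted 0).map Prod.swap) := by
  have hswap : (fun jv : Int × Int => (jv.2, jv.1)) = (Prod.swap : Int × Int → Int × Int) := rfl
  rw [hswap, pvSorted2_eq]
  set xs := (PySem.List.enumerate predicted 0).map Prod.swap with hxs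
  have hperm : (PySem.List.sorted xs (fun p => toLex p) false).Perm xs :=
    PySem.List.sorted_perm xs _ false
  refine ⟨?_, hperm⟩
  have hxnodup : xs.Nodup := by
    refine List.Nodup.map (fun a b h => Prod.swap_injective h) ?_
    have : (PySem.List.enumerate predicted 0).Pairwise (· ≠ ·) :=
      (PySem.List.pairwise_lt_enumerate predicted 0).imp (fun h => by
        intro he; rw [he] at h; exact lt_irrefl _ h)
    simpa [List.Nodup] using this
  have hnodup : (PySem.List.sorted xs (fun p => toLex p) false).Nodup :=
    hperm.symm.nodup hxnodup
  have hle := PySem.List.sorted_pairwise xs (fun p : Int × Int => toLex p)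
  have := hle.and hnodup
  refine this.imp ?_
  rintro a b ⟨h1, h2⟩
  have : toLex a < toLex b := lt_of_le_of_ne h1 (fun hc => h2 (by
    have := congrArg (fun z => (ofLex z)) hc
    simpa using this))
  rw [Prod.Lex.lt_iff] at this
  simpa [pvLex] using this


theorem pvContains_add (s : PySem.Set Int) (x y : Int) :
    (PySem.Set.add s x).contains y = (s.contains y || decide (y = x)) := by
  have h := PySem.Set.mem_add s x y
  simp only [PySem.Set.contains]
  by_cases hy : y ∈ PySem.Set.add s x <;> simp_all

theorem pvFst_nonneg {predicted : List Int} {m : Int × Int}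
    (hm : m ∈ PySem.List.enumerate predicted 0) : 0 ≤ m.1 := by
  rcases (PySem.List.mem_enumerate_iff _ _ _).1 hm with ⟨k, hk, rfl⟩
  simp

-- the outer loops kept in lock-step: A's (matches, used-set) state against
-- B's (matches, sorted-available-array) state
theorem pvOuter (predicted : List Int) (tolerance : Int) :
    ∀ (RL : List (Int × Int)) (acc : List (Int × Int)) (used : PySem.Set Int)
      (arr : List (Int × Int)),
      arr.Pairwise pvLex →
      arr.Perm (((PySem.List.enumerate predicted 0).filter
        (fun jp => !(PySem.Set.contains used jp.1))).map Prod.swap) →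
      (RL.foldl
        (fun (st : List (Int × Int) × PySem.Set Int) (rp : Int × Int) =>
          let best := List.foldl
            (fun (b : Int × Int) (jp : Int × Int) =>
              if PySem.Set.contains st.2 jp.1 then b
              else
                let diff := |jp.2 - rp.2|
                if diff ≤ tolerance ∧ diff < b.2 then (jp.1, diff) else b)
            (-1, tolerance + 1) (PySem.List.enumerate predicted 0)
          if best.1 ≥ 0 then (st.1 ++ [(rp.1, best.1)], PySem.Set.add st.2 best.1) else st)
        (acc, used)).1
      = (RL.foldl (pvStepB tolerance) (acc, arr)).1 := by
  intro RL
  induction RL with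
  | nil => intro acc used arr _ _; rfl
  | cons rp t ih =>
    intro acc used arr hlex hperm
    have hav : ((PySem.List.enumerate predicted 0).filter
        (fun jp => !(PySem.Set.contains used jp.1))).Pairwise (fun p q => p.1 < q.1) :=
      (PySem.List.pairwise_lt_enumerate predicted 0).filter _
    have hskip : (PySem.List.enumerate predicted 0).foldl
        (fun (b : Int × Int) (jp : Int × Int) =>
          if PySem.Set.contains used jp.1 then b
          else
            let diff := |jp.2 - rp.2|
            if diff ≤ tolerance ∧ diff < b.2 then (jp.1, diff) else b)
        (-1, tolerance + 1)
        = ((PySem.List.enumerate predicted 0).filter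
            (fun jp => !(PySem.Set.contains used jp.1))).foldl (pvBestStep tolerance rp.2)
            (-1, tolerance + 1) :=
      pvSkip_filter tolerance rp.2 used (PySem.List.enumerate predicted 0) _
    rw [List.foldl_cons, List.foldl_cons]
    simp only []
    rw [hskip]
    rcases pvScanA tolerance rp.2 _ hav with ⟨hno, hres⟩ | ⟨m, hbest, hres⟩
    · -- no candidate: both sides keep their state
      rw [hres]
      have hpick : pvPick tolerance arr rp.2 = none := by
        rcases pvChoose tolerance rp.2 arr hlex with ⟨hn, _⟩ | ⟨v, j, p, hpick, hp, helem, hc, _⟩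
        · exact hn
        · exfalso
          have hmem : (v, j) ∈ arr := by
            have : arr[p] = (v, j) := by
              rw [← helem]
              simp [List.getD_eq_getElem?_getD, List.getElem?_eq_getElem hp]
            exact this ▸ List.getElem_mem hp
          have := hperm.mem_iff.1 hmem
          rcases List.mem_map.1 this with ⟨q, hq, hqe⟩
          have hq2 : q.2 = v := by
            have := congrArg Prod.fst hqe
            simpa [Prod.swap] using this
          exact hno q hq (by rw [hq2]; exact hc)
      rw [if_neg (by omega : ¬ ((-1 : Int), tolerance + 1).1 ≥ 0)]
      have hB : pvStepB tolerance (acc, arr) rp = (acc, arr) := by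
        simp [pvStepB, hpick]
      rw [hB]
      exact ih acc used arr hlex hperm
    · -- a candidate is chosen: both sides pick the same pair
      rw [hres]
      rcases pvChoose tolerance rp.2 arr hlex with ⟨hn, hnone⟩ | ⟨v, j, p, hpick, hp, helem, hc, hbound⟩
      · exfalso
        have hmem : Prod.swap m ∈ arr :=
          hperm.mem_iff.2 (List.mem_map_of_mem hbest.1)
        exact hnone (Prod.swap m) hmem hbest.2.1
      · have hmemvj : (v, j) ∈ arr := by
          have : arr[p] = (v, j) := by
            rw [← helem]
            simp [List.getD_eq_getElem?_getD, List.getElem?_eq_getElem hp]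
          exact this ▸ List.getElem_mem hp
        have hm' : pvIsBest tolerance rp.2
            ((PySem.List.enumerate predicted 0).filter
              (fun jp => !(PySem.Set.contains used jp.1))) (j, v) := by
          refine ⟨?_, hc, ?_⟩
          · rcases List.mem_map.1 (hperm.mem_iff.1 hmemvj) with ⟨q, hq, hqe⟩
            have : q = (j, v) := by
              have h1 := congrArg Prod.fst hqe
              have h2 := congrArg Prod.snd hqe
              simp [Prod.swap] at h1 h2
              exact Prod.ext h2 h1
            exact this ▸ hq
          · intro y hy hyc
            have hymem : Prod.swap y ∈ arr :=
              hperm.mem_iff.2 (List.mem_map_of_mem hy)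
            have := hbound (Prod.swap y) hymem (by simpa [Prod.swap] using hyc)
            simpa [Prod.swap] using this
        have hmm : m = (j, v) := pvBest_unique tolerance rp.2 _ hav hbest hm'
        have hnn : (0 : Int) ≤ m.1 :=
          pvFst_nonneg (List.mem_of_mem_filter hbest.1)
        rw [if_pos (by simpa using hnn)]
        have hB : pvStepB tolerance (acc, arr) rp
            = (acc ++ [(rp.1, j)], arr.eraseIdx p) := by
          simp [pvStepB, hpick]
        rw [hB, hmm]
        have herase := pvErase arr _ p v j hlex hperm hav hp helem
        have hfilter : (PySem.List.enumerate predicted 0).filter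
            (fun jp => !(PySem.Set.contains (PySem.Set.add used j) jp.1))
            = ((PySem.List.enumerate predicted 0).filter
                (fun jp => !(PySem.Set.contains used jp.1))).filter
              (fun q => q.1 ≠ j) := by
          rw [List.filter_filter]
          apply List.filter_congr
          intro jp _
          rw [pvContains_add]
          by_cases h1 : used.contains jp.1 = true <;> by_cases h2 : jp.1 = j <;>
            simp_all
        exact ih _ (PySem.Set.add used j) (arr.eraseIdx p) herase.1
          (by rw [hfilter]; exact herase.2)


-- ===== VERDICT (by name: the statement is the Claim_ definition above) =====
theorem match_events_py_spec : Claim_equal_match_events_py := by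
  intro predicted reference tolerance _
  show match_events_py predicted reference tolerance = match_events_py_alt predicted reference tolerance
  unfold match_events_py match_events_py_alt
  exact pvOuter predicted tolerance (PySem.List.enumerate reference 0) [] PySem.Set.empty _
    (pvInit predicted).1
    (by
      have h2 := (pvInit predicted).2
      have : (PySem.List.enumerate predicted 0).filter
          (fun jp => !(PySem.Set.contains PySem.Set.empty jp.1))
          = PySem.List.enumerate predicted 0 := by
        apply List.filter_eq_self.mpr
        intro a _
        simp [PySem.Set.contains, PySem.Set.empty]
      rw [this]
      exact h2)
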